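-- pv_equiv track=rewrite | github.com/Vladymyr-Chuchkanov/ISLabs | main1.py | check_next
-- ===== SOURCE A (Python) =====
-- def check_next(arr, cell, col_bound, row_bound):
--     if cell[0]<= 0 or cell[0]>=col_bound or cell[1]>=row_bound or cell[1]<=0:
--         return False
--     if cell in arr:
--         return False
--     calc = 0
--     neighbors = []
--     for cell0 in arr:
--         if (cell0[0]==cell[0] and (cell0[1]+1==cell[1] or cell0[1]-1==cell[1])) or (cell0[1]==cell[1] and (cell0[0]+1==cell[0] or cell0[0]-1==cell[0])):
--             calc+=1
--             neighbors.append(cell0)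
--
--     if calc == 2:
--         if neighbors[0][0]==neighbors[1][0] or neighbors[0][1]==neighbors[1][1]:
--             return True
--         return False
--     if calc >2:
--         return False
--     return True
-- ===== SOURCE B (Python) =====
-- def check_next(arr, cell, col_bound, row_bound):
--     cx, cy = cell[0], cell[1]
--     if cx <= 0 or cx >= col_bound or cy >= row_bound or cy <= 0:
--         return False
--     if cell in arr:
--         return False
--     h = arr.count((cx - 1, cy)) + arr.count((cx + 1, cy))
--     v = arr.count((cx, cy - 1)) + arr.count((cx, cy + 1))
--     return h + v <= 2 and not (h == 1 and v == 1)
-- ===== Notes on version B (the rewrite author's own statement) =====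
-- stated objective: simpler
-- what changed: B replaces A's scan that accumulates a neighbors list and the neighbors[0]/neighbors[1] collinearity branch by counting horizontal and vertical neighbor occurrences directly (arr.count of the four neighbor coordinates) and one arithmetic return: h+v<=2 and not (h==1 and v==1).
import Mathlib
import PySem

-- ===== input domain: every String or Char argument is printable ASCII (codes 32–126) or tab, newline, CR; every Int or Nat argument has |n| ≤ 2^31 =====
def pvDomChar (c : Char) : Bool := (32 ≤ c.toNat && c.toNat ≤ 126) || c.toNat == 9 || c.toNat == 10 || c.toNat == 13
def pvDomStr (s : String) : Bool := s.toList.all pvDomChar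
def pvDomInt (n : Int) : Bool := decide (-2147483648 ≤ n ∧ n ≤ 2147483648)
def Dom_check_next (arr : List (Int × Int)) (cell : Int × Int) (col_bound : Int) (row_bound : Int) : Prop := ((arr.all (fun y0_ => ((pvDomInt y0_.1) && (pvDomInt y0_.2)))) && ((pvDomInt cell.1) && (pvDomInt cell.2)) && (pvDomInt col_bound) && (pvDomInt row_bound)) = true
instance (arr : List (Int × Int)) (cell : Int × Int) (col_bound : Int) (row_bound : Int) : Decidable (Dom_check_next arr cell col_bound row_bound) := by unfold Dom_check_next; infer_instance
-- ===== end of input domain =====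

-- ===== PORT A =====
-- B counts the four neighbor coordinates directly instead of scanning arr into a neighbors list (simpler arithmetic return; same O(n) cost).
-- A-side helper: the loop's neighbor test and step, named so the fold can be stated about them
def aCond (cell cell0 : Int × Int) : Bool :=
  (cell0.1 == cell.1 && (cell0.2 + 1 == cell.2 || cell0.2 - 1 == cell.2)) ||
  (cell0.2 == cell.2 && (cell0.1 + 1 == cell.1 || cell0.1 - 1 == cell.1))

def aStep (cell : Int × Int) (st : Int × List (Int × Int)) (cell0 : Int × Int) : Int × List (Int × Int) :=
  if aCond cell cell0 then (st.1 + 1, st.2 ++ [cell0]) else st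

def check_next (arr : List (Int × Int)) (cell : Int × Int) (col_bound : Int) (row_bound : Int) : Bool :=
  if cell.1 <= 0 || cell.1 >= col_bound || cell.2 >= row_bound || cell.2 <= 0 then false
  else if arr.contains cell then false
  else
    let st := arr.foldl (aStep cell) (0, [])
    let calcv := st.1
    let neighbors := st.2
    if calcv == 2 then
      -- neighbors[0], neighbors[1]: in-range whenever calcv == 2 (Python would raise otherwise)
      match PySem.List.pyGet? neighbors 0, PySem.List.pyGet? neighbors 1 with
      | some n0, some n1 => n0.1 == n1.1 || n0.2 == n1.2
      | _, _ => false
    else if calcv > 2 then false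
    else true

-- ===== PORT B =====
def check_next_alt (arr : List (Int × Int)) (cell : Int × Int) (col_bound : Int) (row_bound : Int) : Bool :=
  if cell.1 <= 0 || cell.1 >= col_bound || cell.2 >= row_bound || cell.2 <= 0 then false
  else if arr.contains cell then false
  else
    let h := PySem.List.count arr (cell.1 - 1, cell.2) + PySem.List.count arr (cell.1 + 1, cell.2)
    let v := PySem.List.count arr (cell.1, cell.2 - 1) + PySem.List.count arr (cell.1, cell.2 + 1)
    decide (h + v <= 2) && !(h == 1 && v == 1)

-- ===== PRECONDITION & SPEC =====
def Spec_check_next (arr : List (Int × Int)) (cell : Int × Int) (col_bound : Int) (row_bound : Int) (out : Bool) : Prop := out = check_next_alt arr cell col_bound row_bound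
instance (arr : List (Int × Int)) (cell : Int × Int) (col_bound : Int) (row_bound : Int) (out : Bool) : Decidable (Spec_check_next arr cell col_bound row_bound out) := by unfold Spec_check_next; infer_instance

-- ===== CLAIM (what is proved, stated in full; the proofs are below) =====
def Claim_equal_check_next : Prop := ∀ (arr : List (Int × Int)) (cell : Int × Int) (col_bound : Int) (row_bound : Int), Dom_check_next arr cell col_bound row_bound → Spec_check_next arr cell col_bound row_bound (check_next arr cell col_bound row_bound)

-- ===== LEMMAS AND PROOFS =====

theorem aCond_iff (cx cy : Int) (x : Int × Int) :
    aCond (cx, cy) x = true ↔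
      (x = (cx - 1, cy) ∨ x = (cx + 1, cy) ∨ x = (cx, cy - 1) ∨ x = (cx, cy + 1)) := by
  cases x with
  | mk a b => simp [aCond, Prod.ext_iff]; omega

theorem foldl_aStep (cell : Int × Int) (arr : List (Int × Int)) :
    ∀ (c : Int) (ns : List (Int × Int)),
      arr.foldl (aStep cell) (c, ns) =
        (c + (arr.countP (aCond cell) : Int), ns ++ arr.filter (aCond cell)) := by
  induction arr with
  | nil => intro c ns; simp
  | cons x xs ih =>
      intro c ns
      by_cases hx : aCond cell x = true <;>
        simp [aStep, hx, ih] <;> omega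

theorem countP_split (cx cy : Int) (arr : List (Int × Int)) :
    arr.countP (aCond (cx, cy)) =
      arr.count (cx - 1, cy) + arr.count (cx + 1, cy) +
      (arr.count (cx, cy - 1) + arr.count (cx, cy + 1)) := by
  induction arr with
  | nil => simp
  | cons x xs ih =>
      simp only [List.countP_cons, List.count_cons, ih]
      by_cases h1 : x = (cx - 1, cy) <;> by_cases h2 : x = (cx + 1, cy) <;>
        by_cases h3 : x = (cx, cy - 1) <;> by_cases h4 : x = (cx, cy + 1) <;>
        simp_all [aCond_iff, Prod.ext_iff] <;> (try split_ifs) <;> omega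

theorem pair_sum (cx cy : Int) (ns : List (Int × Int))
    (hmem : ∀ x ∈ ns, aCond (cx, cy) x = true) :
    ns.count (cx - 1, cy) + ns.count (cx + 1, cy) +
      (ns.count (cx, cy - 1) + ns.count (cx, cy + 1)) = ns.length := by
  rw [← countP_split]
  rw [List.countP_eq_length.mpr hmem]

-- ===== VERDICT (by name: the statement is the Claim_ definition above) =====
theorem check_next_spec : Claim_equal_check_next := by
  intro arr cell col_bound row_bound _
  unfold Spec_check_next check_next check_next_alt
  obtain ⟨cx, cy⟩ := cell
  by_cases hb : ((cx : Int) ≤ 0 ∨ cx ≥ col_bound ∨ cy ≥ row_bound ∨ cy ≤ 0)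
  · rcases hb with h | h | h | h <;> simp [h]
  · push_neg at hb
    obtain ⟨h1, h2, h3, h4⟩ := hb
    simp only [decide_eq_true_eq, show ¬ (cx ≤ 0) by omega, show ¬ (cx ≥ col_bound) by omega,
      show ¬ (cy ≥ row_bound) by omega, show ¬ (cy ≤ 0) by omega,
      Bool.or_self, if_false]
    by_cases hm : (cx, cy) ∈ arr
    · simp [hm]
    · simp only [List.contains_eq_mem, hm, decide_false, if_false, Bool.false_eq_true]
      rw [foldl_aStep]
      simp only [List.nil_append, PySem.List.count_eq]
      have hcf : ∀ a : Int × Int, aCond (cx, cy) a = true →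
          arr.count a = (arr.filter (aCond (cx, cy))).count a := by
        intro a ha
        simp [List.count_filter, ha]
      -- rewrite B's four counts as counts over the filtered list
      simp only [hcf _ (by simp [aCond_iff] : aCond (cx, cy) (cx - 1, cy) = true),
        hcf _ (by simp [aCond_iff] : aCond (cx, cy) (cx + 1, cy) = true),
        hcf _ (by simp [aCond_iff] : aCond (cx, cy) (cx, cy - 1) = true),
        hcf _ (by simp [aCond_iff] : aCond (cx, cy) (cx, cy + 1) = true)]
      have hmem : ∀ x ∈ arr.filter (aCond (cx, cy)), aCond (cx, cy) x = true := by
        intro x hx; exact (List.mem_filter.mp hx).2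
      have hlen : arr.countP (aCond (cx, cy)) = (arr.filter (aCond (cx, cy))).length := by
        simp [List.countP_eq_length_filter]
      generalize hns : arr.filter (aCond (cx, cy)) = ns at *
      have hsum := pair_sum cx cy ns hmem
      rw [hlen]
      rcases hK : ns.length with _ | _ | _ | m
      · -- calc = 0
        rw [hK] at hsum
        rw [Bool.eq_iff_iff]
        simp
        omega
      · -- calc = 1
        rw [hK] at hsum
        rw [Bool.eq_iff_iff]
        simp
        omega
      · -- calc = 2
        obtain ⟨n0, n1, hns2⟩ := List.length_eq_two.mp hK
        have m0 : aCond (cx, cy) n0 = true := hmem n0 (hns2 ▸ List.mem_cons_self)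
        have m1 : aCond (cx, cy) n1 = true := hmem n1 (hns2 ▸ by simp)
        subst hns2
        have g0 : PySem.List.pyGet? [n0, n1] (0 : Int) = some n0 := rfl
        have g1 : PySem.List.pyGet? [n0, n1] (1 : Int) = some n1 := rfl
        rw [g0, g1]
        norm_num
        rw [Bool.eq_iff_iff]
        simp only [Bool.or_eq_true, beq_iff_eq, Bool.and_eq_true, decide_eq_true_eq,
          Bool.not_eq_true', Bool.and_eq_false_iff, beq_eq_false_iff_ne, ne_eq]
        rcases (aCond_iff cx cy n0).mp m0 with e0 | e0 | e0 | e0 <;>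
          rcases (aCond_iff cx cy n1).mp m1 with e1 | e1 | e1 | e1 <;>
          subst e0 <;> subst e1
        all_goals
          clear hsum hcf hmem hlen hns hK g0 g1
          simp only [List.count_cons, List.count_nil, beq_iff_eq, Prod.mk.injEq, and_true, true_and, if_true, if_false, or_true, true_or, iff_true, true_iff]
          split_ifs <;> omega
      · -- calc ≥ 3
        rw [hK] at hsum
        have hc1 : ((0 : Int) + ((m + 3 : Nat) : Int) == 2) = false := by
          simp; omega
        rw [hc1]
        simp only [Bool.false_eq_true, if_false]
        rw [if_pos (by push_cast; omega : (0 : Int) + ((m + 3 : Nat) : Int) > 2)]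
        rw [Bool.eq_iff_iff]
        simp
        omega
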